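-- pv_equiv track=rewrite | github.com/KeitumetseK/alx-interview | 0x01-lockboxes/0-lockboxes.py | canUnlockAll
-- ===== SOURCE A (Python) =====
-- from typing import List
--
-- def canUnlockAll(boxes: List[List[int]]) -> bool:
--     """
--     Determines if all the boxes can be unlocked.
--
--     Args:
--         boxes (List[List[int]]): A list of lists where each sublist represents keys contained in a box.
--
--     Returns:
--         bool: True if all boxes can be unlocked, otherwise False.
--     """
--     n = len(boxes)
--     unlocked = [False] * n
--     unlocked[0] = True
--     keys = [0]
--
--     while keys:
--         current_key = keys.pop()
--         for key in boxes[current_key]: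
--             if key < n and not unlocked[key]:
--                 unlocked[key] = True
--                 keys.append(key)
--
--     return all(unlocked)
-- ===== SOURCE B (Python) =====
-- from typing import List
--
-- def canUnlockAll(boxes: List[List[int]]) -> bool:
--     """Fixpoint sweep: repeatedly scan all boxes, opening every box whose key
--     is held by an already-open box, until a full pass changes nothing."""
--     n = len(boxes)
--     unlocked = [i == 0 for i in range(n)]
--     changed = True
--     while changed:
--         changed = False
--         for i in range(n):
--             if unlocked[i]:
--                 for key in boxes[i]:
--                     if key < n and not unlocked[key]:
--                         unlocked[key] = True
--                         changed = True
--     return all(unlocked)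
-- ===== Notes on version B (the rewrite author's own statement) =====
-- stated objective: alternative
-- what changed: Replaced the explicit DFS key stack with a boolean-table fixpoint: repeated full sweeps over all boxes that open every box reachable from an open one, stopping when a whole pass changes nothing.
-- outside the precondition, e.g. on canUnlockAll([[], [-5]]): A returns False, B returns False
-- crash fix: On empty boxes A raises IndexError at 'unlocked[0] = True'; B returns True (all() of an empty list). — e.g. on canUnlockAll([]): A raises IndexError, B returns true
import Mathlib
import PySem

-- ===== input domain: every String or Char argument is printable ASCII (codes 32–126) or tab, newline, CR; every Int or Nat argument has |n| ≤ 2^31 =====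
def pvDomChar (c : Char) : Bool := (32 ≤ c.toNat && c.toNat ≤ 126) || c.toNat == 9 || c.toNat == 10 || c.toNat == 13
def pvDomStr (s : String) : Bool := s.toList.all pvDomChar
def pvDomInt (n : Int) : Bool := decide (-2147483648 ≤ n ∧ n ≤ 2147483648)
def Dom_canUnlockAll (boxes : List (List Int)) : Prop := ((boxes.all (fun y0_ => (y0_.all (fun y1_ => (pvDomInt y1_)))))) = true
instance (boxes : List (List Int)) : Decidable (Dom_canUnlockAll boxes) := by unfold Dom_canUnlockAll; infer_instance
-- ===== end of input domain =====

-- B replaces A's explicit DFS key stack with repeated full boolean-table sweeps until a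
-- pass unlocks nothing new (a fixpoint computation); same result, not faster.


-- ===== PORT A =====
-- DFS over an explicit stack 'keys', popping from the end, exactly as Source A.
-- The 'while keys:' loop is ported with fuel boxes.length + 1; on every input admitted
-- by Pre_ the loop is proved below to finish before the fuel runs out.
def loopA (boxes : List (List Int)) : Nat → List Bool → List Int → List Bool
  | 0, unlocked, _ => unlocked
  | fuel+1, unlocked, keys =>
    match PySem.List.pop? keys (-1) with
    | none => unlocked
    | some (current, rest) =>
      let s := (PySem.List.pyGetD boxes current []).foldl
        (fun (s : List Bool × List Int) key =>
          if key < (boxes.length : Int) && !(PySem.List.pyGetD s.1 key false) then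
            (PySem.List.pySetD s.1 key true, s.2 ++ [key])
          else s) (unlocked, rest)
      loopA boxes fuel s.1 s.2

def canUnlockAll (boxes : List (List Int)) : Bool :=
  (loopA boxes (boxes.length + 1)
    (PySem.List.pySetD (List.replicate boxes.length false) 0 true) [0]).all (fun b => b)

-- ===== PORT B =====
-- One full sweep over all box indices: opens every box whose key lies in an open box,
-- reporting in the flag whether anything changed.
def sweepB (boxes : List (List Int)) (u0 : List Bool) : List Bool × Bool :=
  (PySem.List.pyRange 0 (boxes.length : Int) 1).foldl
    (fun (s : List Bool × Bool) i =>
      if PySem.List.pyGetD s.1 i false then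
        (PySem.List.pyGetD boxes i []).foldl
          (fun (t : List Bool × Bool) key =>
            if key < (boxes.length : Int) && !(PySem.List.pyGetD t.1 key false) then
              (PySem.List.pySetD t.1 key true, true)
            else t) s
      else s) (u0, false)

-- The 'while changed:' loop, with fuel boxes.length + 1 (each continuing sweep is proved
-- below to unlock at least one new box on Pre_ inputs, so the fuel suffices there).
def loopB (boxes : List (List Int)) : Nat → List Bool → List Bool
  | 0, u => u
  | fuel+1, u =>
    let s := sweepB boxes u
    if s.2 then loopB boxes fuel s.1 else s.1

def canUnlockAll_alt (boxes : List (List Int)) : Bool :=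
  (loopB boxes (boxes.length + 1)
    ((PySem.List.pyRange 0 (boxes.length : Int) 1).map (fun i => i == 0))).all (fun b => b)

-- ===== PRECONDITION & SPEC =====
-- Pre_ excludes (1) the empty list, on which A raises IndexError at 'unlocked[0] = True',
-- and (2) inputs containing a key < -len(boxes): when such a key sits in a reachable box
-- both programs raise IndexError; the closed form also drops inputs whose bad key sits in
-- an unreachable box (there A returns and B agrees — see the cite), since whether A raises
-- would otherwise depend on running the search.
def Pre_canUnlockAll (boxes : List (List Int)) : Prop :=
  boxes ≠ [] ∧ ∀ b ∈ boxes, ∀ k ∈ b, -(boxes.length : Int) ≤ k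
instance (boxes : List (List Int)) : Decidable (Pre_canUnlockAll boxes) := by
  unfold Pre_canUnlockAll; infer_instance

def pvWitness_canUnlockAll : List (List Int) := [[1], [0]]

-- On empty boxes A raises IndexError at 'unlocked[0] = True'; B returns True.
def Raises_canUnlockAll (boxes : List (List Int)) : Prop := boxes = []
instance (boxes : List (List Int)) : Decidable (Raises_canUnlockAll boxes) := by
  unfold Raises_canUnlockAll; infer_instance
def pvRaiseWitness_canUnlockAll : List (List Int) := []
def pvRaiseWitnessOut_canUnlockAll : Bool := true

def Spec_canUnlockAll (boxes : List (List Int)) (out : Bool) : Prop := out = canUnlockAll_alt boxes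
instance (boxes : List (List Int)) (out : Bool) : Decidable (Spec_canUnlockAll boxes out) := by
  unfold Spec_canUnlockAll; infer_instance

-- ===== CLAIM (what is proved, stated in full; the proofs are below) =====
def Claim_equal_canUnlockAll : Prop := ∀ (boxes : List (List Int)), Dom_canUnlockAll boxes → Pre_canUnlockAll boxes → Spec_canUnlockAll boxes (canUnlockAll boxes)
def Claim_raises_canUnlockAll : Prop := (∀ (boxes : List (List Int)), Dom_canUnlockAll boxes → Raises_canUnlockAll boxes → ¬ Pre_canUnlockAll boxes) ∧ (Dom_canUnlockAll (pvRaiseWitness_canUnlockAll) ∧ Raises_canUnlockAll (pvRaiseWitness_canUnlockAll) ∧ canUnlockAll_alt (pvRaiseWitness_canUnlockAll) = pvRaiseWitnessOut_canUnlockAll)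

-- ===== LEMMAS AND PROOFS =====

-- Python's index normalisation for an in-range index (negative indices count from the end).
def pvIdx (n : Nat) (k : Int) : Nat := if 0 ≤ k then k.toNat else n - (-k).toNat

-- "box i holds a key opening box j" (both as normalised indices).
def pvStep (boxes : List (List Int)) (i j : Nat) : Prop :=
  ∃ k ∈ boxes.getD i [], k < (boxes.length : Int) ∧ pvIdx boxes.length k = j

def pvReach (boxes : List (List Int)) (j : Nat) : Prop :=
  Relation.ReflTransGen (pvStep boxes) 0 j

def pvMarked (u : List Bool) (j : Nat) : Prop := u.getD j false = true

lemma pvIdx_spec {n : Nat} {k : Int} (h1 : -(n : Int) ≤ k) (h2 : k < (n : Int)) :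
    PySem.List.pyIdx? n k = some (pvIdx n k) := by
  simp only [PySem.List.pyIdx?, pvIdx]
  split_ifs <;> rfl

lemma pvIdx_lt {n : Nat} {k : Int} (_hn : 0 < n) (h1 : -(n : Int) ≤ k) (h2 : k < (n : Int)) :
    pvIdx n k < n := by
  unfold pvIdx
  split_ifs with h <;> omega

lemma pyGetD_eq_getD {α : Type} {xs : List α} {n : Nat} {k : Int} (hl : xs.length = n)
    (h1 : -(n : Int) ≤ k) (h2 : k < (n : Int)) (d : α) :
    PySem.List.pyGetD xs k d = xs.getD (pvIdx n k) d := by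
  subst hl
  simp [PySem.List.pyGetD, PySem.List.pyGet?, pvIdx_spec h1 h2, List.getD_eq_getElem?_getD]

lemma pySetD_eq_set {α : Type} {xs : List α} {n : Nat} {k : Int} (hl : xs.length = n)
    (h1 : -(n : Int) ≤ k) (h2 : k < (n : Int)) (v : α) :
    PySem.List.pySetD xs k v = xs.set (pvIdx n k) v := by
  subst hl
  simp [PySem.List.pySetD, PySem.List.pySet?, pvIdx_spec h1 h2]

lemma pvMarked_lt {u : List Bool} {j : Nat} (h : pvMarked u j) : j < u.length := by
  by_contra hc
  rw [pvMarked, List.getD_eq_default _ _ (by omega)] at h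
  exact Bool.false_ne_true h

lemma pvMarked_set {u : List Bool} {i j : Nat} :
    pvMarked (u.set i true) j ↔ (j = i ∧ i < u.length) ∨ pvMarked u j := by
  unfold pvMarked
  simp only [List.getD_eq_getElem?_getD, List.getElem?_set]
  by_cases hij : i = j
  · subst hij
    by_cases hi : i < u.length
    · simp [hi]
    · simp [hi]
  · simp only [if_neg hij]
    constructor
    · exact fun h => Or.inr h
    · rintro (⟨hji, -⟩ | h)
      · exact absurd hji.symm hij
      · exact h

lemma count_false_set {u : List Bool} {j : Nat} (hj : j < u.length)
    (hf : u.getD j false = false) :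
    (u.set j true).count false + 1 = u.count false := by
  induction u generalizing j with
  | nil => simp at hj
  | cons b t ih =>
    cases j with
    | zero =>
      simp only [List.getD_cons_zero] at hf
      subst hf
      simp
    | succ m =>
      simp only [List.getD_cons_succ] at hf
      simp only [List.set_cons_succ, List.count_cons]
      have := ih (by simpa using hj) hf
      omega

-- closedness + base gives the full reachable set
lemma closed_marked_iff {boxes : List (List Int)} {u : List Bool}
    (h0 : pvMarked u 0)
    (hr : ∀ j, pvMarked u j → pvReach boxes j)
    (hc : ∀ j, pvMarked u j → ∀ j', pvStep boxes j j' → pvMarked u j') :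
    ∀ j, pvMarked u j ↔ pvReach boxes j := by
  intro j
  constructor
  · exact hr j
  · intro h
    induction h with
    | refl => exact h0
    | tail h1 h2 ih => exact hc _ ih _ h2

-- ===== A-side =====

-- the inner 'for key in boxes[current]' fold of A
lemma innerA_spec (boxes : List (List Int)) (ks : List Int)
    (hk : ∀ k ∈ ks, -(boxes.length : Int) ≤ k)
    (hre : ∀ k ∈ ks, k < (boxes.length : Int) → pvReach boxes (pvIdx boxes.length k)) :
    ∀ u st (r : List Bool × List Int), u.length = boxes.length →
    (∀ j, pvMarked u j → pvReach boxes j) →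
    r = ks.foldl (fun (s : List Bool × List Int) key =>
        if key < (boxes.length : Int) && !(PySem.List.pyGetD s.1 key false) then
          (PySem.List.pySetD s.1 key true, s.2 ++ [key])
        else s) (u, st) →
    (r.1.length = boxes.length ∧
     (∀ j, pvMarked u j → pvMarked r.1 j) ∧
     (∀ j, pvMarked r.1 j → pvReach boxes j) ∧
     (∃ new, r.2 = st ++ new ∧ (∀ k ∈ new, PySem.Raise.InRange boxes.length k ∧
        pvMarked r.1 (pvIdx boxes.length k)) ∧
        (∀ j, pvMarked r.1 j → pvMarked u j ∨ ∃ k ∈ new, pvIdx boxes.length k = j)) ∧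
     (∀ k ∈ ks, k < (boxes.length : Int) → pvMarked r.1 (pvIdx boxes.length k)) ∧
     r.2.length + r.1.count false = st.length + u.count false) := by
  induction ks with
  | nil =>
    intro u st r hl hr hrr
    subst hrr
    refine ⟨hl, fun j h => h, hr, ⟨[], by simp, by simp, fun j h => Or.inl h⟩, by simp, by simp⟩
  | cons key ks ih =>
    intro u st r hl hr hrr
    have hkey : -(boxes.length : Int) ≤ key := hk key List.mem_cons_self
    rw [List.foldl_cons] at hrr
    by_cases hlt : key < (boxes.length : Int)
    · by_cases hm : PySem.List.pyGetD u key false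
      · -- already unlocked: no change
        rw [if_neg (by simp [hlt, hm])] at hrr
        obtain ⟨c1, c2, c3, c4, c6, c7⟩ :=
          ih (fun k hmem => hk k (List.mem_cons_of_mem _ hmem))
            (fun k hmem => hre k (List.mem_cons_of_mem _ hmem)) u st r hl hr hrr
        have hmk : pvMarked u (pvIdx boxes.length key) := by
          rwa [pyGetD_eq_getD hl hkey hlt, ← pvMarked] at hm
        refine ⟨c1, c2, c3, c4, ?_, c7⟩
        intro k hmem hklt
        rcases List.mem_cons.mp hmem with rfl | hmem'
        · exact c2 _ hmk
        · exact c6 k hmem' hklt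
      · -- newly unlocked: flip and push
        rw [if_pos (by simp [hlt, hm])] at hrr
        have hn : 0 < boxes.length := by omega
        have hidx : pvIdx boxes.length key < boxes.length := pvIdx_lt hn hkey hlt
        rw [pySetD_eq_set hl hkey hlt] at hrr
        set u' := u.set (pvIdx boxes.length key) true with hu'
        have hl' : u'.length = boxes.length := by simp [hu', hl]
        have hmono : ∀ j, pvMarked u j → pvMarked u' j := fun j h => pvMarked_set.mpr (Or.inr h)
        have hmk' : pvMarked u' (pvIdx boxes.length key) :=
          pvMarked_set.mpr (Or.inl ⟨rfl, by omega⟩)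
        have hr' : ∀ j, pvMarked u' j → pvReach boxes j := by
          intro j h
          rcases pvMarked_set.mp h with ⟨rfl, -⟩ | h'
          · exact hre key List.mem_cons_self hlt
          · exact hr j h'
        have hcnt : u'.count false + 1 = u.count false := by
          refine count_false_set (by omega) ?_
          rw [pyGetD_eq_getD hl hkey hlt] at hm
          exact Bool.not_eq_true _ ▸ Bool.of_not_eq_true hm
        obtain ⟨c1, c2, c3, c4, c6, c7⟩ :=
          ih (fun k hmem => hk k (List.mem_cons_of_mem _ hmem))
            (fun k hmem => hre k (List.mem_cons_of_mem _ hmem)) u' (st ++ [key]) r hl' hr' hrr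
        refine ⟨c1, fun j h => c2 j (hmono j h), c3, ?_, ?_, ?_⟩
        · obtain ⟨new, hnew, hnewP, hnewC⟩ := c4
          refine ⟨key :: new, by simpa using hnew, ?_, ?_⟩
          · intro k hmem
            rcases List.mem_cons.mp hmem with rfl | hmem'
            · exact ⟨⟨hkey, hlt⟩, c2 _ hmk'⟩
            · exact hnewP k hmem'
          · intro j h
            rcases hnewC j h with h' | ⟨k, hmem, h2⟩
            · rcases pvMarked_set.mp h' with ⟨rfl, -⟩ | h''
              · exact Or.inr ⟨key, List.mem_cons_self, rfl⟩
              · exact Or.inl h''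
            · exact Or.inr ⟨k, List.mem_cons_of_mem _ hmem, h2⟩
        · intro k hmem hklt
          rcases List.mem_cons.mp hmem with rfl | hmem'
          · exact c2 _ hmk'
          · exact c6 k hmem' hklt
        · simp only [List.length_append, List.length_cons, List.length_nil] at c7 ⊢
          omega
    · -- key out of range: no change
      rw [if_neg (by simp [hlt])] at hrr
      obtain ⟨c1, c2, c3, c4, c6, c7⟩ :=
        ih (fun k hmem => hk k (List.mem_cons_of_mem _ hmem))
          (fun k hmem => hre k (List.mem_cons_of_mem _ hmem)) u st r hl hr hrr
      refine ⟨c1, c2, c3, c4, ?_, c7⟩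
      intro k hmem hklt
      rcases List.mem_cons.mp hmem with rfl | hmem'
      · exact absurd hklt hlt
      · exact c6 k hmem' hklt

def InvA (boxes : List (List Int)) (u : List Bool) (keys : List Int) : Prop :=
  u.length = boxes.length ∧ pvMarked u 0 ∧
  (∀ j, pvMarked u j → pvReach boxes j) ∧
  (∀ k ∈ keys, PySem.Raise.InRange boxes.length k ∧ pvMarked u (pvIdx boxes.length k)) ∧
  (∀ j, pvMarked u j →
    (∃ k ∈ keys, pvIdx boxes.length k = j) ∨ ∀ j', pvStep boxes j j' → pvMarked u j')

lemma loopA_spec (boxes : List (List Int))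
    (hP : ∀ b ∈ boxes, ∀ k ∈ b, -(boxes.length : Int) ≤ k) :
    ∀ fuel u keys, InvA boxes u keys → keys.length + u.count false ≤ fuel →
    (loopA boxes fuel u keys).length = boxes.length ∧
    (∀ j, pvMarked (loopA boxes fuel u keys) j ↔ pvReach boxes j) := by
  intro fuel
  induction fuel with
  | zero =>
    intro u keys ⟨hl, h0, hr, hst, hcl⟩ hb
    have : keys = [] := List.length_eq_zero_iff.mp (by omega)
    subst this
    exact ⟨hl, closed_marked_iff h0 hr (fun j hj => by
      rcases hcl j hj with ⟨k, hk, -⟩ | h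
      · exact absurd hk (List.not_mem_nil)
      · exact h)⟩
  | succ fuel ih =>
    intro u keys hInv hb
    obtain ⟨hl, h0, hr, hst, hcl⟩ := hInv
    by_cases hne : keys = []
    · subst hne
      show ((loopA boxes (fuel+1) u []).length = boxes.length ∧ _)
      rw [show loopA boxes (fuel+1) u [] = u from by simp [loopA, PySem.List.pop?]]
      exact ⟨hl, closed_marked_iff h0 hr (fun j hj => by
        rcases hcl j hj with ⟨k, hk, -⟩ | h
        · exact absurd hk (List.not_mem_nil)
        · exact h)⟩
    · -- pop the last key
      have hkeys : keys.dropLast ++ [keys.getLast hne] = keys := List.dropLast_append_getLast hne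
      set current := keys.getLast hne with hcur
      set rest := keys.dropLast with hrest
      have hpop : PySem.List.pop? keys (-1) = some (current, rest) := by
        rw [← hkeys]; exact PySem.List.pop?_last _ _
      have hcurmem : current ∈ keys := List.getLast_mem hne
      obtain ⟨hcurIR, hcurmk⟩ := hst current hcurmem
      have hn : 0 < boxes.length := by
        rcases hcurIR with ⟨hh1, hh2⟩; omega
      have hic : pvIdx boxes.length current < boxes.length := pvIdx_lt hn hcurIR.1 hcurIR.2
      have hbox : PySem.List.pyGetD boxes current ([] : List Int)
          = boxes.getD (pvIdx boxes.length current) [] := pyGetD_eq_getD rfl hcurIR.1 hcurIR.2 _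
      have hboxmem : boxes.getD (pvIdx boxes.length current) [] ∈ boxes := by
        rw [List.getD_eq_getElem _ _ hic]; exact List.getElem_mem hic
      have hkbox : ∀ k ∈ boxes.getD (pvIdx boxes.length current) [], -(boxes.length : Int) ≤ k :=
        fun k hmem => hP _ hboxmem k hmem
      have hrebox : ∀ k ∈ boxes.getD (pvIdx boxes.length current) [],
          k < (boxes.length : Int) → pvReach boxes (pvIdx boxes.length k) := by
        intro k hmem hklt
        exact Relation.ReflTransGen.tail (hr _ hcurmk) ⟨k, hmem, hklt, rfl⟩
      have hstep : loopA boxes (fuel+1) u keys = loopA boxes fuel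
          ((boxes.getD (pvIdx boxes.length current) []).foldl
            (fun (s : List Bool × List Int) key =>
              if key < (boxes.length : Int) && !(PySem.List.pyGetD s.1 key false) then
                (PySem.List.pySetD s.1 key true, s.2 ++ [key])
              else s) (u, rest)).1
          ((boxes.getD (pvIdx boxes.length current) []).foldl
            (fun (s : List Bool × List Int) key =>
              if key < (boxes.length : Int) && !(PySem.List.pyGetD s.1 key false) then
                (PySem.List.pySetD s.1 key true, s.2 ++ [key])
              else s) (u, rest)).2 := by
        conv_lhs => rw [loopA, hpop]
        simp only [hbox]
      obtain ⟨c1, c2, c3, ⟨new, hnew, hnewP, hnewC⟩, c6, c7⟩ :=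
        innerA_spec boxes _ hkbox hrebox u rest _ hl hr rfl
      rw [hstep]
      have hrestlen : rest.length + 1 = keys.length := by
        rw [hrest, List.length_dropLast]
        have := List.length_pos_of_ne_nil hne
        omega
      refine ih _ _ ⟨c1, c2 0 h0, c3, ?_, ?_⟩ (by omega)
      · intro k hmem
        rw [hnew] at hmem
        rcases List.mem_append.mp hmem with hmem' | hmem'
        · obtain ⟨hIR, hmk⟩ := hst k (by rw [← hkeys]; exact List.mem_append_left _ hmem')
          exact ⟨hIR, c2 _ hmk⟩
        · exact hnewP k hmem'
      · intro j hj
        rcases hnewC j hj with hju | ⟨k, hmem, h2⟩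
        · rcases hcl j hju with ⟨k, hkmem, hkidx⟩ | hclosed
          · rcases List.mem_append.mp (hkeys ▸ hkmem) with hkm | hkm
            · exact Or.inl ⟨k, by rw [hnew]; exact List.mem_append_left _ hkm, hkidx⟩
            · -- k = current: box of j has just been processed, so j is closed now
              have hkc : k = current := by simpa using hkm
              subst hkc
              refine Or.inr ?_
              intro j' hstep'
              obtain ⟨k', hk'mem, hk'lt, hk'idx⟩ := hstep'
              rw [← hkidx] at hk'mem
              exact hk'idx ▸ c6 k' hk'mem hk'lt
          · exact Or.inr (fun j' hs => c2 _ (hclosed j' hs))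
        · exact Or.inl ⟨k, by rw [hnew]; exact List.mem_append_right _ hmem, h2⟩

-- ===== B-side =====

-- the inner 'for key in boxes[i]' fold of B
lemma innerB_spec (boxes : List (List Int)) (ks : List Int)
    (hk : ∀ k ∈ ks, -(boxes.length : Int) ≤ k)
    (hre : ∀ k ∈ ks, k < (boxes.length : Int) → pvReach boxes (pvIdx boxes.length k)) :
    ∀ u (ch : Bool) (r : List Bool × Bool), u.length = boxes.length →
    (∀ j, pvMarked u j → pvReach boxes j) →
    r = ks.foldl (fun (t : List Bool × Bool) key =>
        if key < (boxes.length : Int) && !(PySem.List.pyGetD t.1 key false) then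
          (PySem.List.pySetD t.1 key true, true)
        else t) (u, ch) →
    (r.1.length = boxes.length ∧
     (∀ j, pvMarked u j → pvMarked r.1 j) ∧
     (∀ j, pvMarked r.1 j → pvReach boxes j) ∧
     (r.2 = false → ch = false ∧ r.1 = u ∧
        ∀ k ∈ ks, k < (boxes.length : Int) → pvMarked u (pvIdx boxes.length k)) ∧
     r.1.count false ≤ u.count false ∧
     (ch = false → r.2 = true → r.1.count false < u.count false)) := by
  induction ks with
  | nil =>
    intro u ch r hl hr hrr
    subst hrr
    exact ⟨hl, fun j h => h, hr, fun h2 => ⟨h2, rfl, by simp⟩, le_refl _,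
      fun h1 h2 => by simp [h1] at h2⟩
  | cons key ks ih =>
    intro u ch r hl hr hrr
    have hkey : -(boxes.length : Int) ≤ key := hk key List.mem_cons_self
    rw [List.foldl_cons] at hrr
    by_cases hlt : key < (boxes.length : Int)
    · by_cases hm : PySem.List.pyGetD u key false
      · rw [if_neg (by simp [hlt, hm])] at hrr
        obtain ⟨c1, c2, c3, c4, c5, c6⟩ :=
          ih (fun k hmem => hk k (List.mem_cons_of_mem _ hmem))
            (fun k hmem => hre k (List.mem_cons_of_mem _ hmem)) u ch r hl hr hrr
        have hmk : pvMarked u (pvIdx boxes.length key) := by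
          rwa [pyGetD_eq_getD hl hkey hlt, ← pvMarked] at hm
        refine ⟨c1, c2, c3, ?_, c5, c6⟩
        intro h2
        obtain ⟨d1, d2, d3⟩ := c4 h2
        refine ⟨d1, d2, ?_⟩
        intro k hmem hklt
        rcases List.mem_cons.mp hmem with rfl | hmem'
        · exact hmk
        · exact d3 k hmem' hklt
      · rw [if_pos (by simp [hlt, hm])] at hrr
        have hn : 0 < boxes.length := by omega
        have hidx : pvIdx boxes.length key < boxes.length := pvIdx_lt hn hkey hlt
        rw [pySetD_eq_set hl hkey hlt] at hrr
        set u' := u.set (pvIdx boxes.length key) true with hu'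
        have hl' : u'.length = boxes.length := by simp [hu', hl]
        have hmono : ∀ j, pvMarked u j → pvMarked u' j := fun j h => pvMarked_set.mpr (Or.inr h)
        have hr' : ∀ j, pvMarked u' j → pvReach boxes j := by
          intro j h
          rcases pvMarked_set.mp h with ⟨rfl, -⟩ | h'
          · exact hre key List.mem_cons_self hlt
          · exact hr j h'
        have hcnt : u'.count false + 1 = u.count false := by
          refine count_false_set (by omega) ?_
          rw [pyGetD_eq_getD hl hkey hlt] at hm
          exact Bool.not_eq_true _ ▸ Bool.of_not_eq_true hm
        obtain ⟨c1, c2, c3, c4, c5, c6⟩ :=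
          ih (fun k hmem => hk k (List.mem_cons_of_mem _ hmem))
            (fun k hmem => hre k (List.mem_cons_of_mem _ hmem)) u' true r hl' hr' hrr
        refine ⟨c1, fun j h => c2 j (hmono j h), c3, ?_, by omega, ?_⟩
        · intro h2
          obtain ⟨d1, -⟩ := c4 h2
          exact absurd d1 (by simp)
        · intro h1 h2
          omega
    · rw [if_neg (by simp [hlt])] at hrr
      obtain ⟨c1, c2, c3, c4, c5, c6⟩ :=
        ih (fun k hmem => hk k (List.mem_cons_of_mem _ hmem))
          (fun k hmem => hre k (List.mem_cons_of_mem _ hmem)) u ch r hl hr hrr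
      refine ⟨c1, c2, c3, ?_, c5, c6⟩
      intro h2
      obtain ⟨d1, d2, d3⟩ := c4 h2
      refine ⟨d1, d2, ?_⟩
      intro k hmem hklt
      rcases List.mem_cons.mp hmem with rfl | hmem'
      · exact absurd hklt hlt
      · exact d3 k hmem' hklt

-- the outer 'for i in range(n)' fold of one sweep, over an arbitrary index list
lemma sweepAux (boxes : List (List Int))
    (hP : ∀ b ∈ boxes, ∀ k ∈ b, -(boxes.length : Int) ≤ k) :
    ∀ (l : List Int), (∀ i ∈ l, 0 ≤ i ∧ i < (boxes.length : Int)) →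
    ∀ u (ch : Bool) (r : List Bool × Bool), u.length = boxes.length →
    (∀ j, pvMarked u j → pvReach boxes j) →
    r = l.foldl (fun (s : List Bool × Bool) i =>
        if PySem.List.pyGetD s.1 i false then
          (PySem.List.pyGetD boxes i []).foldl
            (fun (t : List Bool × Bool) key =>
              if key < (boxes.length : Int) && !(PySem.List.pyGetD t.1 key false) then
                (PySem.List.pySetD t.1 key true, true)
              else t) s
        else s) (u, ch) →
    (r.1.length = boxes.length ∧
     (∀ j, pvMarked u j → pvMarked r.1 j) ∧
     (∀ j, pvMarked r.1 j → pvReach boxes j) ∧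
     (r.2 = false → ch = false ∧ r.1 = u ∧
        ∀ i ∈ l, pvMarked u i.toNat → ∀ j', pvStep boxes i.toNat j' → pvMarked u j') ∧
     r.1.count false ≤ u.count false ∧
     (ch = false → r.2 = true → r.1.count false < u.count false)) := by
  intro l
  induction l with
  | nil =>
    intro hmem u ch r hl hr hrr
    subst hrr
    exact ⟨hl, fun j h => h, hr, fun h2 => ⟨h2, rfl, by simp⟩, le_refl _,
      fun h1 h2 => by simp [h1] at h2⟩
  | cons i l ih =>
    intro hmem u ch r hl hr hrr
    obtain ⟨hi0, hin⟩ := hmem i List.mem_cons_self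
    have hIR : PySem.Raise.InRange boxes.length i := ⟨by omega, hin⟩
    have hidx : pvIdx boxes.length i = i.toNat := by unfold pvIdx; rw [if_pos hi0]
    have hitn : i.toNat < boxes.length := by omega
    rw [List.foldl_cons] at hrr
    by_cases hm : PySem.List.pyGetD u i false
    · -- box i is open: process its keys
      rw [if_pos hm] at hrr
      have hmk : pvMarked u i.toNat := by
        rwa [pyGetD_eq_getD hl hIR.1 hIR.2, hidx, ← pvMarked] at hm
      have hboxmem : boxes.getD i.toNat [] ∈ boxes := by
        rw [List.getD_eq_getElem _ _ hitn]; exact List.getElem_mem hitn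
      have hbox : PySem.List.pyGetD boxes i ([] : List Int) = boxes.getD i.toNat [] := by
        rw [pyGetD_eq_getD rfl hIR.1 hIR.2, hidx]
      have hkbox : ∀ k ∈ boxes.getD i.toNat [], -(boxes.length : Int) ≤ k :=
        fun k hkm => hP _ hboxmem k hkm
      have hrebox : ∀ k ∈ boxes.getD i.toNat [], k < (boxes.length : Int) →
          pvReach boxes (pvIdx boxes.length k) := by
        intro k hkm hklt
        exact Relation.ReflTransGen.tail (hr _ hmk) ⟨k, hkm, hklt, rfl⟩
      rw [hbox] at hrr
      obtain ⟨c1, c2, c3, c4, c5, c6⟩ :=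
        innerB_spec boxes _ hkbox hrebox u ch _ hl hr rfl
      set s1 := (boxes.getD i.toNat []).foldl
        (fun (t : List Bool × Bool) key =>
          if key < (boxes.length : Int) && !(PySem.List.pyGetD t.1 key false) then
            (PySem.List.pySetD t.1 key true, true)
          else t) (u, ch) with hs1
      obtain ⟨e1, e2, e3, e4, e5, e6⟩ :=
        ih (fun i' hm' => hmem i' (List.mem_cons_of_mem _ hm')) s1.1 s1.2 r c1 c3
          (by rw [hrr])
      refine ⟨e1, fun j h => e2 j (c2 j h), e3, ?_, by omega, ?_⟩
      · intro h2
        obtain ⟨f1, f2, f3⟩ := e4 h2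
        obtain ⟨g1, g2, g3⟩ := c4 f1
        refine ⟨g1, by rw [f2, g2], ?_⟩
        intro i' hi'mem hi'mk j' hs
        rcases List.mem_cons.mp hi'mem with rfl | hm'
        · obtain ⟨k, hkm, hklt, hkidx⟩ := hs
          exact hkidx ▸ g3 k hkm hklt
        · -- later index: nothing changed in the whole pass, use the tail conclusion
          have := f3 i' hm'
          rw [g2] at this
          exact this hi'mk j' hs
      · intro h1 h2
        by_cases hs2 : s1.2
        · have := c6 h1 hs2
          omega
        · have h5 := e6 (by simpa using hs2) h2
          obtain ⟨-, g2, -⟩ := c4 (by simpa using hs2)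
          rw [g2] at h5
          omega
    · -- box i closed: skip
      rw [if_neg hm] at hrr
      obtain ⟨e1, e2, e3, e4, e5, e6⟩ :=
        ih (fun i' hm' => hmem i' (List.mem_cons_of_mem _ hm')) u ch r hl hr hrr
      refine ⟨e1, e2, e3, ?_, e5, e6⟩
      intro h2
      obtain ⟨f1, f2, f3⟩ := e4 h2
      refine ⟨f1, f2, ?_⟩
      intro i' hi'mem hi'mk j' hs
      rcases List.mem_cons.mp hi'mem with rfl | hm'
      · exact absurd hi'mk (by
          rwa [pyGetD_eq_getD hl hIR.1 hIR.2, hidx, ← pvMarked] at hm)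
      · exact f3 i' hm' hi'mk j' hs

lemma sweepB_spec (boxes : List (List Int))
    (hP : ∀ b ∈ boxes, ∀ k ∈ b, -(boxes.length : Int) ≤ k)
    (u : List Bool) (hl : u.length = boxes.length)
    (hr : ∀ j, pvMarked u j → pvReach boxes j) :
    ((sweepB boxes u).1.length = boxes.length ∧
     (∀ j, pvMarked u j → pvMarked (sweepB boxes u).1 j) ∧
     (∀ j, pvMarked (sweepB boxes u).1 j → pvReach boxes j) ∧
     ((sweepB boxes u).2 = false → (sweepB boxes u).1 = u ∧
        ∀ j, pvMarked u j → ∀ j', pvStep boxes j j' → pvMarked u j') ∧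
     ((sweepB boxes u).2 = true → (sweepB boxes u).1.count false < u.count false)) := by
  have hmem : ∀ i ∈ PySem.List.pyRange 0 (boxes.length : Int) 1, 0 ≤ i ∧ i < (boxes.length : Int) :=
    fun i hi => PySem.List.mem_pyRange_one.mp hi
  obtain ⟨c1, c2, c3, c4, c5, c6⟩ :=
    sweepAux boxes hP _ hmem u false (sweepB boxes u) hl hr (by rw [sweepB])
  refine ⟨c1, c2, c3, ?_, fun h => c6 rfl h⟩
  intro h2
  obtain ⟨-, d2, d3⟩ := c4 h2
  refine ⟨d2, ?_⟩
  intro j hj j' hs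
  have hjlt : j < boxes.length := hl ▸ pvMarked_lt hj
  have hjmem : (j : Int) ∈ PySem.List.pyRange 0 (boxes.length : Int) 1 :=
    PySem.List.mem_pyRange_one.mpr ⟨by omega, by exact_mod_cast hjlt⟩
  have := d3 (j : Int) hjmem
  rw [Int.toNat_natCast] at this
  exact this hj j' hs

lemma loopB_spec (boxes : List (List Int))
    (hP : ∀ b ∈ boxes, ∀ k ∈ b, -(boxes.length : Int) ≤ k) :
    ∀ fuel u, u.length = boxes.length → pvMarked u 0 →
    (∀ j, pvMarked u j → pvReach boxes j) → u.count false + 1 ≤ fuel →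
    (loopB boxes fuel u).length = boxes.length ∧
    (∀ j, pvMarked (loopB boxes fuel u) j ↔ pvReach boxes j) := by
  intro fuel
  induction fuel with
  | zero => intro u _ _ _ hb; omega
  | succ fuel ih =>
    intro u hl h0 hr hb
    obtain ⟨c1, c2, c3, c4, c5⟩ := sweepB_spec boxes hP u hl hr
    show ((loopB boxes (fuel+1) u).length = boxes.length ∧ _)
    rw [show loopB boxes (fuel+1) u
        = if (sweepB boxes u).2 then loopB boxes fuel (sweepB boxes u).1
          else (sweepB boxes u).1 from rfl]
    by_cases hch : (sweepB boxes u).2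
    · rw [if_pos hch]
      have := c5 hch
      exact ih (sweepB boxes u).1 c1 (c2 0 h0) c3 (by omega)
    · rw [if_neg hch]
      obtain ⟨d1, d2⟩ := c4 (by simpa using hch)
      rw [d1]
      exact ⟨hl, closed_marked_iff h0 hr d2⟩

-- ===== initial states =====

-- both initial unlocked tables are [True, False, False, …]
lemma seed_spec (n : Nat) (boxes : List (List Int)) (hn : boxes.length = n) (h0 : 0 < n) :
    ∀ u, u = true :: List.replicate (n-1) false →
    (u.length = boxes.length ∧ pvMarked u 0 ∧
     (∀ j, pvMarked u j → pvReach boxes j) ∧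
     (∀ k ∈ ([0] : List Int), PySem.Raise.InRange boxes.length k ∧ pvMarked u (pvIdx boxes.length k)) ∧
     (∀ j, pvMarked u j → (∃ k ∈ ([0] : List Int), pvIdx boxes.length k = j) ∨
        ∀ j', pvStep boxes j j' → pvMarked u j') ∧
     u.count false = n - 1) := by
  intro u hu
  subst hu
  have hj0 : ∀ j, pvMarked (true :: List.replicate (n-1) false) j → j = 0 := by
    intro j hj
    by_contra hne
    have hj' : j - 1 ≥ 0 := by omega
    cases j with
    | zero => exact hne rfl
    | succ m =>
      rw [pvMarked, List.getD_cons_succ] at hj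
      rcases Nat.lt_or_ge m (n-1) with h | h
      · rw [List.getD_eq_getElem _ _ (by simpa using h)] at hj
        simp at hj
      · rw [List.getD_eq_default _ _ (by simpa using h)] at hj
        exact Bool.false_ne_true hj
  have hm0 : pvMarked (true :: List.replicate (n-1) false) 0 := rfl
  have hIdx0 : pvIdx boxes.length 0 = 0 := by unfold pvIdx; simp
  refine ⟨by simp [hn]; omega, hm0, ?_, ?_, ?_, by simp⟩
  · intro j hj
    rw [hj0 j hj]
    exact Relation.ReflTransGen.refl
  · intro k hk
    rcases List.mem_singleton.mp hk with rfl
    refine ⟨⟨?_, ?_⟩, by rw [hIdx0]; exact hm0⟩ <;> · simp only [hn]; omega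
  · intro j hj
    exact Or.inl ⟨0, List.mem_singleton.mpr rfl, by rw [hIdx0, hj0 j hj]⟩

lemma initA_seed (n : Nat) (h0 : 0 < n) :
    PySem.List.pySetD (List.replicate n false) 0 true = true :: List.replicate (n-1) false := by
  have hl : (List.replicate n false).length = n := List.length_replicate
  have h := pySetD_eq_set (n := n) (k := 0) hl (by omega) (by exact_mod_cast h0) true
  rw [h, show pvIdx n 0 = 0 from by unfold pvIdx; simp]
  cases n with
  | zero => omega
  | succ m => simp [List.replicate_succ]

lemma initB_seed_aux (n : Int) : ∀ m : Nat, ∀ a : Int, 1 ≤ a → (n - a).toNat = m →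
    (PySem.List.pyRange a n 1).map (fun i => i == 0) = List.replicate m false := by
  intro m
  induction m with
  | zero =>
    intro a ha hm
    rw [PySem.List.pyRange_one_eq_nil (by omega)]
    simp
  | succ m ih =>
    intro a ha hm
    rw [PySem.List.pyRange_one_cons (by omega), List.map_cons,
      ih (a+1) (by omega) (by omega), List.replicate_succ]
    have : (a == 0) = false := by
      simp only [beq_eq_false_iff_ne, ne_eq]
      omega
    rw [this]

lemma initB_seed (n : Nat) (h0 : 0 < n) :
    (PySem.List.pyRange 0 (n : Int) 1).map (fun i => i == 0)
      = true :: List.replicate (n-1) false := by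
  rw [PySem.List.pyRange_one_cons (by exact_mod_cast h0), List.map_cons,
    initB_seed_aux (n : Int) (n-1) (0+1) (by omega) (by omega)]
  simp

-- ===== VERDICT (by name: the statement is the Claim_ definition above) =====
theorem canUnlockAll_spec : Claim_equal_canUnlockAll := by
  intro boxes _ hpre
  obtain ⟨hne, hP⟩ := hpre
  have hn : 0 < boxes.length := List.length_pos_of_ne_nil hne
  unfold Spec_canUnlockAll canUnlockAll canUnlockAll_alt
  rw [initA_seed boxes.length hn, initB_seed boxes.length hn]
  obtain ⟨sInv1, sInv2, sInv3, sInv4, sInv5, scnt⟩ :=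
    seed_spec boxes.length boxes rfl hn _ rfl
  have hA := loopA_spec boxes hP (boxes.length + 1)
      (true :: List.replicate (boxes.length - 1) false) [0]
      ⟨sInv1, sInv2, sInv3, sInv4, sInv5⟩ (by rw [scnt]; simp; omega)
  have hB := loopB_spec boxes hP (boxes.length + 1)
      (true :: List.replicate (boxes.length - 1) false) sInv1 sInv2 sInv3 (by rw [scnt]; omega)
  have hEq : loopA boxes (boxes.length + 1) (true :: List.replicate (boxes.length - 1) false) [0]
      = loopB boxes (boxes.length + 1) (true :: List.replicate (boxes.length - 1) false) := by
    apply List.ext_getElem (by rw [hA.1, hB.1])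
    intro i h1 h2
    have mA := hA.2 i
    have mB := hB.2 i
    rw [pvMarked, List.getD_eq_getElem _ _ h1] at mA
    rw [pvMarked, List.getD_eq_getElem _ _ h2] at mB
    by_cases hre : pvReach boxes i
    · rw [mA.mpr hre, mB.mpr hre]
    · rw [Bool.eq_false_iff.mpr (fun h => hre (mA.mp h)),
        Bool.eq_false_iff.mpr (fun h => hre (mB.mp h))]
  rw [hEq]

@[simp] theorem canUnlockAll_raises : Claim_raises_canUnlockAll := by
  unfold Claim_raises_canUnlockAll
  exact ⟨fun boxes _ hr hp => hp.1 hr, by decide⟩
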